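-- pv_equiv track=rewrite | github.com/ramblox/DCA_Question | DCA_question.py | get_dict_of_teams
-- ===== SOURCE A (Python) =====
-- def get_dict_of_teams(list_of_combinations):
--
--     n=0
--     teams={}
--     temp_teams={}
--     for i in list_of_combinations:
--             current_split=[i]
--             n+=1
--
--             for j in list_of_combinations:
--
--                 h=0
--
--                 if(len(set(i).intersection(set(j)))==0):
--                     for k in current_split:
--                         if(len(set(k).intersection(set(j)))==0):
--                             h+=1
--                     if h==len(current_split):
--                         current_split.append(j)
--
--
--             temp_teams[n]=current_split
--
--     ##temp_teams have duplicates
--     ##removing duplicates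
--     i=0
--     for key,val in temp_teams.items():
--         i+=1
--         if i<=len(temp_teams)/2:
--             teams[key]=val
--
--     return temp_teams
-- ===== SOURCE B (Python) =====
-- def get_dict_of_teams(list_of_combinations):
--     result = {}
--     for n, combo in enumerate(list_of_combinations, 1):
--         split = [combo]
--         union = set(combo)
--         for j in list_of_combinations:
--             js = set(j)
--             if union.isdisjoint(js):
--                 split.append(j)
--                 union |= js
--         result[n] = split
--     return result
-- ===== Notes on version B (the rewrite author's own statement) =====
-- stated objective: alternative
-- what changed: A re-tests each candidate against every member of the growing split (after a redundant test against the seed); B keeps one running set of the characters already used by the split and tests each candidate with a single isdisjoint against it, growing the set incrementally.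
import Mathlib
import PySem

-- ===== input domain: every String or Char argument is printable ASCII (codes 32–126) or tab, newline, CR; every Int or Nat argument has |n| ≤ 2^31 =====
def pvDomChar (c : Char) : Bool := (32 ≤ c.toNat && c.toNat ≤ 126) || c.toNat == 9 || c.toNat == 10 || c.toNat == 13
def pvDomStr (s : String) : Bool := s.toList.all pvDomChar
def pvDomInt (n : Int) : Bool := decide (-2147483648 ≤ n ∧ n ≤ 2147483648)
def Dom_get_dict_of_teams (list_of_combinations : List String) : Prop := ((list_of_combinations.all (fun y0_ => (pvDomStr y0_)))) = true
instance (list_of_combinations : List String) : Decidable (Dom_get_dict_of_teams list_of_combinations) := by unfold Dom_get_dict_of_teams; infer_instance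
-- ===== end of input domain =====

-- B replaces A's per-candidate rescan of the whole current split by one running set of the
-- split's characters and a single isdisjoint test per candidate (objective: alternative).

-- ===== PORT A =====
-- inner loop of A: builds current_split for one seed i (the h-counting loop kept literally)
def pvInnerA (xs : List String) (i : String) : List String :=
  xs.foldl (fun cur j =>
    if PySem.Set.len (PySem.Set.inter (PySem.Set.ofList i.toList) (PySem.Set.ofList j.toList)) = 0 then
      let h := cur.foldl (fun h k =>
        if PySem.Set.len (PySem.Set.inter (PySem.Set.ofList k.toList) (PySem.Set.ofList j.toList)) = 0
        then h + 1 else h) (0 : Int)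
      if h = (cur.length : Int) then cur ++ [j] else cur
    else cur) [i]

-- A builds temp_teams with keys n = 1, 2, …; A's final 'teams' loop is dead code (its dict is
-- never returned — the function returns temp_teams), so it is not reproduced here.
def get_dict_of_teams (list_of_combinations : List String) : List (Int × List String) :=
  (list_of_combinations.foldl
    (fun (st : Int × PySem.Dict Int (List String)) i =>
      (st.1 + 1, st.2.insert (st.1 + 1) (pvInnerA list_of_combinations i)))
    ((0 : Int), PySem.Dict.empty)).2.items

-- ===== PORT B =====
-- inner loop of B: running union of the split's characters, one isdisjoint test per candidate
def pvInnerB (xs : List String) (combo : String) : List String :=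
  (xs.foldl (fun (st : List String × PySem.Set Char) j =>
      let js := PySem.Set.ofList j.toList
      if PySem.Set.isdisjoint st.2 js then (st.1 ++ [j], PySem.Set.union st.2 js) else st)
    ([combo], PySem.Set.ofList combo.toList)).1

def get_dict_of_teams_alt (list_of_combinations : List String) : List (Int × List String) :=
  (PySem.List.enumerate list_of_combinations 1).map
    (fun p => (p.1, pvInnerB list_of_combinations p.2))

-- ===== PRECONDITION & SPEC =====
def Spec_get_dict_of_teams (list_of_combinations : List String) (out : List (Int × List String)) : Prop := out = get_dict_of_teams_alt list_of_combinations
instance (list_of_combinations : List String) (out : List (Int × List String)) : Decidable (Spec_get_dict_of_teams list_of_combinations out) := by unfold Spec_get_dict_of_teams; infer_instance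

-- ===== CLAIM (what is proved, stated in full; the proofs are below) =====
def Claim_equal_get_dict_of_teams : Prop := ∀ (list_of_combinations : List String), Dom_get_dict_of_teams list_of_combinations → Spec_get_dict_of_teams list_of_combinations (get_dict_of_teams list_of_combinations)

-- ===== LEMMAS AND PROOFS =====

-- A's "len(set(a) & set(b)) == 0" is character-disjointness
lemma pvDisj_iff (a b : String) :
    PySem.Set.len (PySem.Set.inter (PySem.Set.ofList a.toList) (PySem.Set.ofList b.toList)) = 0 ↔
      ∀ c ∈ a.toList, c ∉ b.toList := by
  unfold PySem.Set.len
  rw [Int.natCast_eq_zero, List.length_eq_zero_iff, List.eq_nil_iff_forall_not_mem]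
  constructor
  · intro h c hc hcb
    exact h c ((PySem.Set.mem_inter _ _ _).2
      ⟨(PySem.Set.mem_ofList _ _).2 hc, (PySem.Set.mem_ofList _ _).2 hcb⟩)
  · intro h c hc
    rw [PySem.Set.mem_inter, PySem.Set.mem_ofList, PySem.Set.mem_ofList] at hc
    exact h c hc.1 hc.2

-- A's h-counting loop reaches len(current_split) iff every member is disjoint from j
lemma pvCount_iff (cur : List String) (j : String) :
    (cur.foldl (fun h k =>
        if PySem.Set.len (PySem.Set.inter (PySem.Set.ofList k.toList) (PySem.Set.ofList j.toList)) = 0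
        then h + 1 else h) (0 : Int) = (cur.length : Int)) ↔
      ∀ k ∈ cur, ∀ c ∈ k.toList, c ∉ j.toList := by
  have hfun : (fun (h : Int) (k : String) =>
      if PySem.Set.len (PySem.Set.inter (PySem.Set.ofList k.toList) (PySem.Set.ofList j.toList)) = 0
      then h + 1 else h)
    = (fun (h : Int) (k : String) =>
      if (fun k : String => decide (PySem.Set.len (PySem.Set.inter (PySem.Set.ofList k.toList) (PySem.Set.ofList j.toList)) = 0)) k = true
      then h + 1 else h) := by
    funext h k; simp
  rw [hfun, PySem.List.foldl_count_if, zero_add, Int.natCast_inj, List.countP_eq_length]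
  constructor
  · intro h k hk
    have := h k hk
    rw [decide_eq_true_eq, pvDisj_iff] at this
    exact this
  · intro h k hk
    rw [decide_eq_true_eq, pvDisj_iff]
    exact h k hk

-- inner loops agree, by induction with the running-union invariant:
-- u holds exactly the characters of the members of cur, and the seed i stays a member of cur
lemma pvInner_go (i : String) :
    ∀ (l : List String) (cur : List String) (u : PySem.Set Char),
      i ∈ cur →
      (∀ c, c ∈ u ↔ ∃ k ∈ cur, c ∈ k.toList) →
      l.foldl (fun cur j =>
        if PySem.Set.len (PySem.Set.inter (PySem.Set.ofList i.toList) (PySem.Set.ofList j.toList)) = 0 then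
          let h := cur.foldl (fun h k =>
            if PySem.Set.len (PySem.Set.inter (PySem.Set.ofList k.toList) (PySem.Set.ofList j.toList)) = 0
            then h + 1 else h) (0 : Int)
          if h = (cur.length : Int) then cur ++ [j] else cur
        else cur) cur
      = (l.foldl (fun (st : List String × PySem.Set Char) j =>
          let js := PySem.Set.ofList j.toList
          if PySem.Set.isdisjoint st.2 js then (st.1 ++ [j], PySem.Set.union st.2 js) else st)
        (cur, u)).1 := by
  intro l
  induction l with
  | nil => intro cur u _ _; rfl
  | cons j rest ih =>
    intro cur u hi hu
    simp only [List.foldl_cons]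
    by_cases hall : ∀ k ∈ cur, ∀ c ∈ k.toList, c ∉ j.toList
    · -- every member of cur is disjoint from j: both sides append j
      have hB : PySem.Set.isdisjoint u (PySem.Set.ofList j.toList) = true := by
        rw [PySem.Set.isdisjoint_iff]
        intro x hx hxj
        obtain ⟨k, hk, hxk⟩ := (hu x).1 hx
        exact hall k hk x hxk ((PySem.Set.mem_ofList _ _).1 hxj)
      rw [if_pos ((pvDisj_iff i j).2 (hall i hi)), if_pos ((pvCount_iff cur j).2 hall)]
      simp only [hB, if_true]
      refine ih (cur ++ [j]) (PySem.Set.union u (PySem.Set.ofList j.toList))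
        (List.mem_append_left _ hi) ?_
      intro c
      rw [PySem.Set.mem_union, hu c]
      constructor
      · rintro (⟨k, hk, hck⟩ | hcj)
        · exact ⟨k, List.mem_append_left _ hk, hck⟩
        · exact ⟨j, List.mem_append_right _ (List.mem_singleton.2 rfl),
            (PySem.Set.mem_ofList _ _).1 hcj⟩
      · rintro ⟨k, hk, hck⟩
        rcases List.mem_append.1 hk with hk | hk
        · exact Or.inl ⟨k, hk, hck⟩
        · exact Or.inr ((PySem.Set.mem_ofList _ _).2 (List.mem_singleton.1 hk ▸ hck))
    · -- some member of cur shares a character with j: both sides keep the state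
      have hB : ¬ PySem.Set.isdisjoint u (PySem.Set.ofList j.toList) = true := by
        rw [PySem.Set.isdisjoint_iff]
        intro h
        apply hall
        intro k hk c hck hcj
        exact h c ((hu c).2 ⟨k, hk, hck⟩) ((PySem.Set.mem_ofList _ _).2 hcj)
      have hA : (if PySem.Set.len (PySem.Set.inter (PySem.Set.ofList i.toList) (PySem.Set.ofList j.toList)) = 0 then
          (if (cur.foldl (fun h k =>
              if PySem.Set.len (PySem.Set.inter (PySem.Set.ofList k.toList) (PySem.Set.ofList j.toList)) = 0
              then h + 1 else h) (0 : Int)) = (cur.length : Int) then cur ++ [j] else cur)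
        else cur) = cur := by
        by_cases hij : PySem.Set.len (PySem.Set.inter (PySem.Set.ofList i.toList) (PySem.Set.ofList j.toList)) = 0
        · rw [if_pos hij, if_neg (fun hc => hall ((pvCount_iff cur j).1 hc))]
        · rw [if_neg hij]
      simp only [hA, hB, Bool.not_eq_true] at *
      simp only [Bool.false_eq_true, if_false]
      exact ih cur u hi hu

-- the two inner loops compute the same split for every seed
lemma pvInner_eq (xs : List String) (i : String) : pvInnerA xs i = pvInnerB xs i := by
  unfold pvInnerA pvInnerB
  refine pvInner_go i xs [i] (PySem.Set.ofList i.toList) (List.mem_singleton.2 rfl) ?_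
  intro c
  rw [PySem.Set.mem_ofList]
  simp

-- A's outer loop: inserting the fresh keys n+1, n+2, … appends the enumerated splits
lemma pvOuter (xs : List String) :
    ∀ (l : List String) (n : Int) (d : PySem.Dict Int (List String)),
      (∀ k ∈ d.keys, k ≤ n) →
      (l.foldl (fun (st : Int × PySem.Dict Int (List String)) i =>
          (st.1 + 1, st.2.insert (st.1 + 1) (pvInnerA xs i))) (n, d)).2.items
        = d.items ++ (PySem.List.enumerate l (n + 1)).map (fun p => (p.1, pvInnerA xs p.2)) := by
  intro l
  induction l with
  | nil => intro n d _; simp [PySem.List.enumerate_nil]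
  | cons i rest ih =>
    intro n d hbound
    have hfresh : d.contains (n + 1) = false := by
      rw [← Bool.not_eq_true, PySem.Dict.contains_iff_mem_keys]
      intro hmem
      have := hbound _ hmem
      omega
    simp only [List.foldl_cons]
    rw [ih (n + 1) (d.insert (n + 1) (pvInnerA xs i)) ?_]
    · rw [PySem.Dict.items_insert_of_not_contains d _ hfresh,
        PySem.List.enumerate_cons, List.map_cons, List.append_assoc, List.singleton_append]
    · intro k hk
      rw [PySem.Dict.keys_insert_of_not_contains d _ hfresh] at hk
      rcases List.mem_append.1 hk with hk | hk
      · have := hbound _ hk; omega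
      · rw [List.mem_singleton.1 hk]

-- ===== VERDICT (by name: the statement is the Claim_ definition above) =====
theorem get_dict_of_teams_spec : Claim_equal_get_dict_of_teams := by
  intro xs _
  unfold Spec_get_dict_of_teams get_dict_of_teams get_dict_of_teams_alt
  rw [pvOuter xs xs 0 PySem.Dict.empty (by intro k hk; simp [PySem.Dict.keys_empty] at hk)]
  simp only [zero_add]
  have : (PySem.Dict.empty : PySem.Dict Int (List String)).items = [] := rfl
  rw [this, List.nil_append]
  exact List.map_congr_left (fun p _ => by rw [pvInner_eq xs p.2])
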